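-- pv_equiv track=rewrite | github.com/jacopofar/advent2023 | src/advent2023/day02.py | minimal_bag
-- ===== SOURCE A (Python) =====
-- GameDescription = list[dict[str, int]]
--
-- def minimal_bag(game: GameDescription) -> dict[str, int]:
--     minimal_bag = dict()
--     for outcome in game:
--         for color, count in outcome.items():
--             if color not in minimal_bag:
--                 minimal_bag[color] = count
--             else:
--                 minimal_bag[color] = max(count, minimal_bag[color])
--     return minimal_bag
-- ===== SOURCE B (Python) =====
-- def minimal_bag(game):
--     colors = list(dict.fromkeys(c for o in game for c in o))
--     return {c: max(o[c] for o in game if c in o) for c in colors}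
-- ===== Notes on version B (the rewrite author's own statement) =====
-- stated objective: alternative
-- what changed: Instead of folding a running per-color maximum dict across outcomes, B first collects the set of colors and then, per color, scans the outcomes and takes max() over the outcomes containing it (inverted loop nesting).
import Mathlib
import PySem

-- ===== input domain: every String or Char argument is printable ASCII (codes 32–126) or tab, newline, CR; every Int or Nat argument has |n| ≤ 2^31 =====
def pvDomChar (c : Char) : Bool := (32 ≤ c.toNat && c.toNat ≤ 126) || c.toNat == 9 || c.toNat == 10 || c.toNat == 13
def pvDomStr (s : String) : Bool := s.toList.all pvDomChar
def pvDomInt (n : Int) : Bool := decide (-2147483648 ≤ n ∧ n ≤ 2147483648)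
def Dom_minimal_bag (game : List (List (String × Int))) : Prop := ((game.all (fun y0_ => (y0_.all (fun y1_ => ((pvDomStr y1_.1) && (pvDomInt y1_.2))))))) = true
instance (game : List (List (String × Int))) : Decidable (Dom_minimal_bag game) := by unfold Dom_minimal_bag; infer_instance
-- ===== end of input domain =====

-- B inverts the loop nesting: it collects the colors first and then takes max() per color
-- over the outcomes containing it, instead of folding a running per-color maximum dict (alternative decomposition).

-- ===== PORT A =====
-- one iteration of A's inner loop body: 'if color not in minimal_bag: … else: … max …'
def mbStep (d : PySem.Dict String Int) (p : String × Int) : PySem.Dict String Int :=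
  match d.get? p.1 with
  | none => d.insert p.1 p.2
  | some v => d.insert p.1 (max p.2 v)

def minimal_bag (game : List (List (String × Int))) : List (String × Int) :=
  (game.foldl (fun mb o => o.foldl mbStep mb) PySem.Dict.empty).items

-- ===== PORT B =====
-- 'max(o[c] for o in game if c in o)' for one color c; the max? is never none when c occurs in game
def mbAltVal (game : List (List (String × Int))) (c : String) : Int :=
  (PySem.List.max? (game.filterMap (fun o => (PySem.Dict.mk o).get? c)) (fun v => v)).getD 0

def minimal_bag_alt (game : List (List (String × Int))) : List (String × Int) :=
  let colors := PySem.List.dedup (game.flatMap (fun o => o.map Prod.fst))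
  colors.map (fun c => (c, mbAltVal game c))

-- ===== PRECONDITION & SPEC =====
-- Pre_ restricts the association lists to ones that actually represent Python dicts
-- (distinct keys within each outcome); duplicate keys are not representable as a Python dict input.
def Pre_minimal_bag (game : List (List (String × Int))) : Prop :=
  ∀ o ∈ game, (o.map Prod.fst).Nodup
instance (game : List (List (String × Int))) : Decidable (Pre_minimal_bag game) := by
  unfold Pre_minimal_bag; infer_instance

def pvWitness_minimal_bag : (List (List (String × Int))) :=
  [[("red", 1), ("blue", 3)], [("blue", 2), ("green", 4)]]

def Spec_minimal_bag (game : List (List (String × Int))) (out : List (String × Int)) : Prop := out = minimal_bag_alt game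
instance (game : List (List (String × Int))) (out : List (String × Int)) : Decidable (Spec_minimal_bag game out) := by unfold Spec_minimal_bag; infer_instance

-- ===== CLAIM (what is proved, stated in full; the proofs are below) =====
def Claim_equal_minimal_bag : Prop := ∀ (game : List (List (String × Int))), Dom_minimal_bag game → Pre_minimal_bag game → Spec_minimal_bag game (minimal_bag game)

-- ===== LEMMAS AND PROOFS =====

lemma mbStep_eq_insert (d : PySem.Dict String Int) (p : String × Int) :
    mbStep d p = d.insert p.1 (match d.get? p.1 with | none => p.2 | some v => max p.2 v) := by
  cases h : d.get? p.1 <;> simp [mbStep, h]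

-- running max over an Option accumulator (A's per-color update)
def optMax (acc : Option Int) (v : Int) : Option Int :=
  match acc with
  | none => some v
  | some a => some (max v a)

lemma get?_foldl_mbStep (ps : List (String × Int)) (d : PySem.Dict String Int) (k : String) :
    (ps.foldl mbStep d).get? k
      = ((ps.filter (fun p => p.1 == k)).map Prod.snd).foldl optMax (d.get? k) := by
  induction ps generalizing d with
  | nil => simp
  | cons p t ih =>
    by_cases hk : p.1 = k
    · subst hk
      simp only [List.foldl_cons, List.filter_cons, beq_self_eq_true, if_pos, List.map_cons]
      rw [ih]
      cases h : d.get? p.1 <;>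
        simp [mbStep, h, optMax, PySem.Dict.get?_insert_self]
    · have hb : (p.1 == k) = false := by simp [hk]
      simp only [List.foldl_cons, List.filter_cons, hb]
      rw [ih]
      cases h : d.get? p.1 with
      | none =>
        simp only [mbStep, h]
        rw [PySem.Dict.get?_insert_of_ne d p.2 (Ne.symm hk)]
        simp
      | some v =>
        simp only [mbStep, h]
        rw [PySem.Dict.get?_insert_of_ne d (max p.2 v) (Ne.symm hk)]
        simp

lemma foldl_max_swap (t : List Int) (v : Int) :
    t.foldl (fun a x => max x a) v = t.foldl max v := by
  induction t generalizing v with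
  | nil => rfl
  | cons x t ih => simp only [List.foldl_cons, max_comm x v, ih]

lemma foldl_optMax_some (t : List Int) (v : Int) :
    t.foldl optMax (some v) = some (t.foldl (fun a x => max x a) v) := by
  induction t generalizing v with
  | nil => rfl
  | cons x t ih => simp [optMax, ih]

lemma foldl_optMax_eq_max? (vs : List Int) (h : vs ≠ []) :
    vs.foldl optMax none = PySem.List.max? vs (fun v => v) := by
  cases vs with
  | nil => exact absurd rfl h
  | cons v t =>
    rw [PySem.List.max?_id_cons]
    simp only [List.foldl_cons, optMax, foldl_optMax_some, foldl_max_swap]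

-- first-match lookup in a duplicate-free association list, as a filter
lemma lookup_toList_eq_filter (o : List (String × Int)) (h : (o.map Prod.fst).Nodup) (c : String) :
    ((PySem.Dict.mk o).get? c).toList = (o.filter (fun p => p.1 == c)).map Prod.snd := by
  induction o with
  | nil => simp [PySem.Dict.get?]
  | cons p t ih =>
    obtain ⟨k, v⟩ := p
    simp only [List.map_cons, List.nodup_cons] at h
    by_cases hkc : k = c
    · subst hkc
      have hnil : t.filter (fun p => p.1 == k) = [] := by
        rw [List.filter_eq_nil_iff]
        intro q hq
        have : q.1 ∈ t.map Prod.fst := List.mem_map_of_mem hq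
        simp only [beq_iff_eq]
        intro hqk
        exact h.1 (hqk ▸ this)
      rw [PySem.Dict.get?_mk_cons]
      simp [hnil]
    · rw [PySem.Dict.get?_mk_cons]
      have hb : (k == c) = false := by simp [hkc]
      simp only [hb, List.filter_cons]
      exact ih h.2

lemma filterMap_get?_eq_filter_flatten (game : List (List (String × Int)))
    (hpre : Pre_minimal_bag game) (c : String) :
    game.filterMap (fun o => (PySem.Dict.mk o).get? c)
      = ((game.flatten).filter (fun p => p.1 == c)).map Prod.snd := by
  induction game with
  | nil => simp
  | cons o gs ih =>
    have ho := hpre o (by simp)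
    have ihs := ih (fun x hx => hpre x (by simp [hx]))
    cases h : (PySem.Dict.mk o).get? c with
    | none =>
      have := lookup_toList_eq_filter o ho c
      rw [h] at this
      simp only [List.filterMap_cons, h, List.flatten_cons, List.filter_append, List.map_append,
        ← this, ihs, Option.toList_none, List.nil_append]
    | some v =>
      have := lookup_toList_eq_filter o ho c
      rw [h] at this
      simp only [List.filterMap_cons, h, List.flatten_cons, List.filter_append, List.map_append,
        ← this, ihs, Option.toList_some, List.singleton_append]

-- ===== VERDICT (by name: the statement is the Claim_ definition above) =====
lemma foldl_game_eq_flatten (game : List (List (String × Int))) :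
    game.foldl (fun mb o => o.foldl mbStep mb) PySem.Dict.empty
      = (game.flatten).foldl mbStep PySem.Dict.empty := by
  rw [List.foldl_flatten]

-- A's new value for a key, as a function (so the keys_foldl_insert_key pattern applies)
def mbVal (d : PySem.Dict String Int) (x : String × Int) : Int :=
  match d.get? x.1 with | none => x.2 | some v => max x.2 v

lemma mbStep_fun_eq :
    mbStep = fun (d : PySem.Dict String Int) (x : String × Int) => d.insert x.1 (mbVal d x) := by
  funext d x
  exact mbStep_eq_insert d x

lemma keys_A (game : List (List (String × Int))) :
    ((game.flatten).foldl mbStep PySem.Dict.empty).keys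
      = PySem.Set.ofList ((game.flatten).map Prod.fst) := by
  rw [mbStep_fun_eq,
    PySem.Dict.keys_foldl_insert_key (game.flatten) Prod.fst mbVal PySem.Dict.empty]
  rw [PySem.Dict.keys_empty, PySem.Set.update_nil_left]

lemma nodup_keys_A (game : List (List (String × Int))) :
    ((game.flatten).foldl mbStep PySem.Dict.empty).keys.Nodup := by
  rw [mbStep_fun_eq]
  exact PySem.Dict.nodup_keys_foldl_insert_key _ _ _ _ PySem.Dict.nodup_keys_empty

-- ===== VERDICT (by name: the statement is the Claim_ definition above) =====
theorem minimal_bag_spec : Claim_equal_minimal_bag := by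
  intro game _ hpre
  unfold Spec_minimal_bag minimal_bag minimal_bag_alt
  rw [foldl_game_eq_flatten]
  rw [PySem.Dict.items_eq_map_keys _ (nodup_keys_A game) 0, keys_A]
  have hcolors : PySem.List.dedup (game.flatMap (fun o => o.map Prod.fst))
      = PySem.Set.ofList ((game.flatten).map Prod.fst) := by
    rw [PySem.List.dedup_eq_ofList, List.flatMap_def, ← List.map_flatten]
  rw [hcolors]
  apply List.map_congr_left
  intro c hc
  have hcmem : c ∈ (game.flatten).map Prod.fst := (PySem.Set.mem_ofList _ _).mp hc
  obtain ⟨p, hp, hpc⟩ := List.mem_map.mp hcmem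
  have hfilter : p ∈ (game.flatten).filter (fun q => q.1 == c) := by
    rw [List.mem_filter]
    exact ⟨hp, by simp [hpc]⟩
  have hne : ((game.flatten).filter (fun q => q.1 == c)).map Prod.snd ≠ [] := by
    have hmem : p.2 ∈ ((game.flatten).filter (fun q => q.1 == c)).map Prod.snd :=
      List.mem_map_of_mem hfilter
    intro hnil
    rw [hnil] at hmem
    exact absurd hmem (List.not_mem_nil)
  rw [PySem.Dict.getD_eq_get?_getD, get?_foldl_mbStep, PySem.Dict.get?_empty,
    foldl_optMax_eq_max? _ hne]
  rw [mbAltVal, filterMap_get?_eq_filter_flatten game hpre c]
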